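-- pv_equiv track=rewrite | github.com/filming/funtimes | src/cogs/commands/admin/info_bot.py | convert_percentage
-- ===== SOURCE A (Python) =====
-- def convert_percentage(
--     percentage: int, active_symbol: str, inactive_symbol: str
-- ) -> str:
--     """Convert a percentage into an equivalent representative string of emojis."""
--
--     active_symbol_count = min(100, percentage) // 10
--
--     percentage_bar = [
--         active_symbol if i <= (active_symbol_count - 1) else inactive_symbol
--         for i in range(10)
--     ]
--
--     return "".join(percentage_bar)
-- ===== SOURCE B (Python) =====
-- def convert_percentage(
--     percentage: int, active_symbol: str, inactive_symbol: str
-- ) -> str: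
--     """Convert a percentage into an equivalent representative string of emojis."""
--     count = max(0, min(100, percentage) // 10)
--     return active_symbol * count + inactive_symbol * (10 - count)
-- ===== Notes on version B (the rewrite author's own statement) =====
-- stated objective: idiomatic
-- what changed: Replaces the 10-element comprehension with per-index branch and join by a closed-form clamped count and direct string repetition/concatenation.
import Mathlib
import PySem

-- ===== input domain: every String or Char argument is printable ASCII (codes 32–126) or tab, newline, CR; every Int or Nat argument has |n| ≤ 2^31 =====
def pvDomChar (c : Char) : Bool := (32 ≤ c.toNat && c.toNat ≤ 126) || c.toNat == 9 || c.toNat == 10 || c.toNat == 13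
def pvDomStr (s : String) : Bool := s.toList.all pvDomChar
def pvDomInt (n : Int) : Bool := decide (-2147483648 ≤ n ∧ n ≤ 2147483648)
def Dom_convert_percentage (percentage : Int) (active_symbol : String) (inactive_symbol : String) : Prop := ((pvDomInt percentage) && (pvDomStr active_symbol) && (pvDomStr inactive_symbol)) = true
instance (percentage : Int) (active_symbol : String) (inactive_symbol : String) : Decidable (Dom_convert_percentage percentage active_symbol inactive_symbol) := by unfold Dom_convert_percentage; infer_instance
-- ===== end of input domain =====

-- B replaces the element-wise comprehension-and-join with a clamped count and closed-form string repetition (idiomatic; same cost).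


-- ===== PORT A =====
def convert_percentage (percentage : Int) (active_symbol : String) (inactive_symbol : String) : String :=
  let active_symbol_count := PySem.Int.floordiv (min 100 percentage) 10
  let percentage_bar :=
    (PySem.List.pyRange 0 10 1).map
      (fun i => if i ≤ active_symbol_count - 1 then active_symbol else inactive_symbol)
  PySem.Str.join "" percentage_bar

-- ===== PORT B =====
-- Python's s * n (empty for n ≤ 0)
def pyStrMul (s : String) (n : Int) : String :=
  String.ofList (List.replicate n.toNat s.toList).flatten

def convert_percentage_alt (percentage : Int) (active_symbol : String) (inactive_symbol : String) : String :=
  let count := max 0 (PySem.Int.floordiv (min 100 percentage) 10)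
  String.ofList ((pyStrMul active_symbol count).toList ++ (pyStrMul inactive_symbol (10 - count)).toList)

-- ===== PRECONDITION & SPEC =====
def Spec_convert_percentage (percentage : Int) (active_symbol : String) (inactive_symbol : String) (out : String) : Prop := out = convert_percentage_alt percentage active_symbol inactive_symbol
instance (percentage : Int) (active_symbol : String) (inactive_symbol : String) (out : String) : Decidable (Spec_convert_percentage percentage active_symbol inactive_symbol out) := by unfold Spec_convert_percentage; infer_instance

-- ===== CLAIM (what is proved, stated in full; the proofs are below) =====
def Claim_equal_convert_percentage : Prop := ∀ (percentage : Int) (active_symbol : String) (inactive_symbol : String), Dom_convert_percentage percentage active_symbol inactive_symbol → Spec_convert_percentage percentage active_symbol inactive_symbol (convert_percentage percentage active_symbol inactive_symbol)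

-- ===== LEMMAS AND PROOFS =====
theorem key (c : Int) (hc : c ≤ 10) (a i : String) :
    PySem.Str.join "" ((PySem.List.pyRange 0 10 1).map (fun k => if k ≤ c - 1 then a else i))
      = String.ofList ((pyStrMul a (max 0 c)).toList ++ (pyStrMul i (10 - max 0 c)).toList) := by
  have hr : PySem.List.pyRange 0 10 1 = [0,1,2,3,4,5,6,7,8,9] := by decide
  rw [hr]
  unfold pyStrMul
  by_cases h : c ≤ 0
  case pos =>
    have hmax : max 0 c = 0 := by omega
    rw [hmax]
    simp [PySem.Str.join, PySem.Chars.join_cons_cons, PySem.Chars.join_singleton,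
      List.replicate,
      show ¬(0:Int) < c from by omega, show ¬(1:Int) < c from by omega,
      show ¬(2:Int) < c from by omega, show ¬(3:Int) < c from by omega,
      show ¬(4:Int) < c from by omega, show ¬(5:Int) < c from by omega,
      show ¬(6:Int) < c from by omega, show ¬(7:Int) < c from by omega,
      show ¬(8:Int) < c from by omega, show ¬(9:Int) < c from by omega]
  case neg =>
    have hmax : max 0 c = c := by omega
    rw [hmax]
    interval_cases c <;>
      simp [PySem.Str.join, PySem.Chars.join_cons_cons, PySem.Chars.join_singleton,
        List.replicate]

-- ===== VERDICT (by name: the statement is the Claim_ definition above) =====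
theorem convert_percentage_spec : Claim_equal_convert_percentage := by
  intro p a i _
  unfold Spec_convert_percentage convert_percentage convert_percentage_alt
  have hc : PySem.Int.floordiv (min 100 p) 10 ≤ 10 := by
    have h11 := PySem.Int.le_floordiv_iff_mul_le (q := 11) (a := min 100 p) (b := 10) (by norm_num)
    omega
  exact key _ hc a i
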